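-- pv_equiv track=rewrite | github.com/Wessias/PythonMathShizniz | pythonIntroLab4.py | find_gPlus_in_imageMatrix
-- ===== SOURCE A (Python) =====
-- def find_gPlus_in_imageMatrix(matrix):
--     gPlusCount = 0 #GREEN PLUS COUNTER
--     rowMax = len(matrix) - 1
--     colMax = len(matrix[0]) - 1
--
--     for row in range(len(matrix)):
--         for col in range(len(matrix[0])): #Hopefully most images are rectangular
--             if(matrix[row][col] == 128): #Check if green pixel
--                 for i in range(1,3):
--                     #Longest if statement to check that the indexs are in the bounds and the pixels are green
--                     if(    col + i <= colMax #IF1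
--                        and col - i >= 0
--                        and row + i <= rowMax
--                        and row - i >= 0 ):
--
--                         if (    matrix[row][col + i] == 128
--                             and matrix[row][col - i] == 128
--                             and matrix[row + i][col] == 128
--                             and matrix[row - i][col] == 128): #IF2
--
--                             if ( i == 2): #IF3
--                                 #If it gets this far its checked the 2 pixels up/down/left/right and if they're green
--                                 gPlusCount += 1
--                             else: #IF3
--                                 continue
--
--                         else: #IF2
--                             break
--
--                     else: #IF1
--                         break
--
--
--
--
--     return gPlusCount
-- ===== SOURCE B (Python) =====
-- def find_gPlus_in_imageMatrix(matrix):
--     # Run-length tables instead of per-pixel neighbour probing: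
--     # hl[r][c] = length of the horizontal run of 128-cells ending at (r, c);
--     # vl[r][c] = length of the vertical run of 128-cells ending at (r, c).
--     # A plus centred at (r, c) exists iff the horizontal run ending at (r, c+2)
--     # and the vertical run ending at (r+2, c) both have length >= 5.
--     cols = len(matrix[0])
--     hl_rows = []
--     vl_rows = []
--     prev_v = [0] * cols
--     for row in matrix:
--         run = 0
--         hl = []
--         v = []
--         for x, pv in zip(row, prev_v):
--             run = run + 1 if x == 128 else 0
--             hl.append(run)
--             v.append(pv + 1 if x == 128 else 0)
--         hl_rows.append(hl)
--         vl_rows.append(v)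
--         prev_v = v
--     count = 0
--     for r in range(2, len(matrix) - 2):
--         for c in range(2, cols - 2):
--             if hl_rows[r][c + 2] >= 5 and vl_rows[r + 2][c] >= 5:
--                 count += 1
--     return count
-- ===== Notes on version B (the rewrite author's own statement) =====
-- stated objective: alternative
-- what changed: Replaces A's per-pixel probing of the 8 arm cells (with its i=1,2 bounds-checked break/continue loop) by four precomputed run-length tables: one pass builds horizontal and vertical runs of consecutive 128-cells, then a plus centre is recognised purely from two table lookups (run >= 5 ending at the arm tips).
import Mathlib
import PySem

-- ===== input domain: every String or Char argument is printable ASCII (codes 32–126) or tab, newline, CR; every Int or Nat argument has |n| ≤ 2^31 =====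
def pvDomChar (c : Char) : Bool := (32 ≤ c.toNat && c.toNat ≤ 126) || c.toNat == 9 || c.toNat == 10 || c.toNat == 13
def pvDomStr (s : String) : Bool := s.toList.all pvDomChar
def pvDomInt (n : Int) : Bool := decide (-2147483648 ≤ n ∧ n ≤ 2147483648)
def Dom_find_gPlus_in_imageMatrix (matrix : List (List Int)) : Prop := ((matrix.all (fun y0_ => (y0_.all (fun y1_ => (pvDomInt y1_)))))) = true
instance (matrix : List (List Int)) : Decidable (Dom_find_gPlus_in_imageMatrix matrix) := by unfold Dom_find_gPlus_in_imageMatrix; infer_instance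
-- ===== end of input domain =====

-- B replaces A's per-pixel neighbour probing by horizontal/vertical run-length tables
-- (objective: alternative decomposition, same asymptotic cost). Equivalence of RETURN values only.

-- ===== PORT A =====
-- matrix[r][c]; A only evaluates it at indices its bound checks admit (Pre_ covers matrix[row][col] itself)
def pvPx (matrix : List (List Int)) (r c : Int) : Int :=
  PySem.List.pyGetD (PySem.List.pyGetD matrix r []) c 0

-- the 'for i in range(1,3)' loop with its break/continue, state = gPlusCount
def pvAInner (matrix : List (List Int)) (rowMax colMax row col : Int) : List Int → Int → Int
  | [], cnt => cnt
  | i :: rest, cnt =>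
    if col + i ≤ colMax ∧ 0 ≤ col - i ∧ row + i ≤ rowMax ∧ 0 ≤ row - i then
      if pvPx matrix row (col + i) = 128 ∧ pvPx matrix row (col - i) = 128 ∧
         pvPx matrix (row + i) col = 128 ∧ pvPx matrix (row - i) col = 128 then
        if i = 2 then pvAInner matrix rowMax colMax row col rest (cnt + 1)
        else pvAInner matrix rowMax colMax row col rest cnt
      else cnt   -- break
    else cnt     -- break

def find_gPlus_in_imageMatrix (matrix : List (List Int)) : Int :=
  let rowMax : Int := (matrix.length : Int) - 1
  let colMax : Int := ((PySem.List.pyGetD matrix 0 []).length : Int) - 1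
  (PySem.List.pyRange 0 (matrix.length : Int) 1).foldl (fun cnt row =>
    (PySem.List.pyRange 0 ((PySem.List.pyGetD matrix 0 []).length : Int) 1).foldl (fun cnt col =>
      if pvPx matrix row col = 128 then
        pvAInner matrix rowMax colMax row col (PySem.List.pyRange 1 3 1) cnt
      else cnt) cnt) 0

-- ===== PORT B =====
-- one row of Source B's inner loop: for (x, pv) in zip(row, prev_v), building (hl, v) with the running 'run'
def pvRuns : List (Int × Int) → Int → List Int × List Int
  | [], _ => ([], [])
  | (x, pv) :: rest, run =>
    let run' := if x = 128 then run + 1 else 0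
    let v := if x = 128 then pv + 1 else 0
    let t := pvRuns rest run'
    (run' :: t.1, v :: t.2)

-- the 'for row in matrix' loop carrying prev_v, building hl_rows and vl_rows
def pvTables : List (List Int) → List Int → List (List Int) × List (List Int)
  | [], _ => ([], [])
  | row :: rest, prevV =>
    let hv := pvRuns (row.zip prevV) 0
    let t := pvTables rest hv.2
    (hv.1 :: t.1, hv.2 :: t.2)

def find_gPlus_in_imageMatrix_alt (matrix : List (List Int)) : Int :=
  let cols : Nat := (PySem.List.pyGetD matrix 0 []).length
  let tabs := pvTables matrix (List.replicate cols 0)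
  (PySem.List.pyRange 2 ((matrix.length : Int) - 2) 1).foldl (fun cnt r =>
    (PySem.List.pyRange 2 ((cols : Int) - 2) 1).foldl (fun cnt c =>
      if 5 ≤ PySem.List.pyGetD (PySem.List.pyGetD tabs.1 r []) (c + 2) 0 ∧
         5 ≤ PySem.List.pyGetD (PySem.List.pyGetD tabs.2 (r + 2) []) c 0 then cnt + 1
      else cnt) cnt) 0

-- ===== PRECONDITION & SPEC =====
-- Pre_ excludes exactly the inputs where A raises IndexError: the empty matrix (matrix[0])
-- and ragged matrices with a row shorter than row 0 (matrix[row][col] for col < len(matrix[0])).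
def Pre_find_gPlus_in_imageMatrix (matrix : List (List Int)) : Prop :=
  matrix ≠ [] ∧ ∀ row ∈ matrix, (matrix.headD []).length ≤ row.length
instance (matrix : List (List Int)) : Decidable (Pre_find_gPlus_in_imageMatrix matrix) := by
  unfold Pre_find_gPlus_in_imageMatrix; infer_instance

def pvWitness_find_gPlus_in_imageMatrix : List (List Int) :=
  [[128, 128, 128, 0, 0],
   [0, 0, 128, 0, 0],
   [128, 128, 128, 128, 128],
   [0, 0, 128, 0, 0],
   [0, 0, 128, 0, 128]]

def Spec_find_gPlus_in_imageMatrix (matrix : List (List Int)) (out : Int) : Prop := out = find_gPlus_in_imageMatrix_alt matrix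
instance (matrix : List (List Int)) (out : Int) : Decidable (Spec_find_gPlus_in_imageMatrix matrix out) := by unfold Spec_find_gPlus_in_imageMatrix; infer_instance

-- ===== CLAIM (what is proved, stated in full; the proofs are below) =====
def Claim_equal_find_gPlus_in_imageMatrix : Prop := ∀ (matrix : List (List Int)), Dom_find_gPlus_in_imageMatrix matrix → Pre_find_gPlus_in_imageMatrix matrix → Spec_find_gPlus_in_imageMatrix matrix (find_gPlus_in_imageMatrix matrix)

-- ===== LEMMAS AND PROOFS =====

theorem pvRuns_fst_ge (zs : List (Int × Int)) (run : Int) (hrun : 0 ≤ run) (j k : Nat)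
    (hj : j < zs.length) :
    ((k : Int) ≤ (pvRuns zs run).1.getD j 0) ↔
      ((∀ d : Nat, d < k → d ≤ j → (zs.getD (j - d) (0, 0)).1 = 128) ∧
       ((j : Int) + 1 < (k : Int) → (k : Int) - ((j : Int) + 1) ≤ run)) := by
  induction zs generalizing run j with
  | nil => simp at hj
  | cons z rest ih =>
    obtain ⟨x, pv⟩ := z
    by_cases hx : x = 128
    · cases j with
      | zero =>
        simp only [pvRuns, hx, reduceIte, List.getD_cons_zero]
        constructor
        · intro h
          refine ⟨?_, by omega⟩
          intro d hd hd0
          interval_cases d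
          simp
        · intro ⟨h1, h2⟩
          by_cases hk1 : (1:Int) < (k:Int)
          · have := h2 (by omega); omega
          · omega
      | succ j' =>
        simp only [pvRuns, hx, reduceIte, List.getD_cons_succ]
        have hrun' : (0:Int) ≤ run + 1 := by omega
        rw [ih (run + 1) hrun' j' (by simpa using hj)]
        constructor
        · rintro ⟨h1, h2⟩
          constructor
          · intro d hd hd0
            rcases Nat.lt_or_ge d (j' + 1) with hlt | hge
            · have : (j' + 1 - d) = (j' - d) + 1 := by omega
              rw [this, List.getD_cons_succ]
              exact h1 d hd (by omega)
            · have : d = j' + 1 := by omega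
              subst this
              simp
          · intro hk; have := h2 (by push_cast at *; omega); push_cast at *; omega
        · rintro ⟨h1, h2⟩
          constructor
          · intro d hd hd0
            subst hx
            have hidx := h1 d hd (by omega)
            have : (j' + 1 - d) = (j' - d) + 1 := by omega
            rw [this, List.getD_cons_succ] at hidx
            exact hidx
          · intro hk
            by_cases hk2 : ((j':Int) + 1) + 1 < (k:Int)
            · have := h2 (by push_cast at *; omega); push_cast at *; omega
            · push_cast at *; omega
    · cases j with
      | zero =>
        simp only [pvRuns, hx, reduceIte, List.getD_cons_zero]
        constructor
        · intro h
          have hk0 : k = 0 := by omega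
          subst hk0
          exact ⟨by omega, by omega⟩
        · rintro ⟨h1, h2⟩
          by_cases hk0 : k = 0
          · subst hk0; omega
          · exfalso; exact hx (by simpa using h1 0 (by omega) (by omega))
      | succ j' =>
        simp only [pvRuns, hx, reduceIte, List.getD_cons_succ]
        rw [ih 0 le_rfl j' (by simpa using hj)]
        constructor
        · rintro ⟨h1, h2⟩
          have hk : (k:Int) ≤ (j':Int) + 1 := by
            by_contra hc; have := h2 (by omega); omega
          constructor
          · intro d hd hd0
            have hdle : d ≤ j' := by omega
            have : (j' + 1 - d) = (j' - d) + 1 := by omega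
            rw [this, List.getD_cons_succ]
            exact h1 d hd hdle
          · intro hkk; push_cast at *; omega
        · rintro ⟨h1, h2⟩
          by_cases hk : (k:Int) ≤ (j':Int) + 1
          · constructor
            · intro d hd hd0
              have hidx := h1 d hd (by omega)
              have : (j' + 1 - d) = (j' - d) + 1 := by omega
              rw [this, List.getD_cons_succ] at hidx
              exact hidx
            · intro hkk; omega
          · exfalso
            have hidx := h1 (j' + 1) (by omega) (by omega)
            simp at hidx
            exact hx hidx

theorem pvRuns_snd_length (zs : List (Int × Int)) (run : Int) : (pvRuns zs run).2.length = zs.length := by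
  induction zs generalizing run with
  | nil => rfl
  | cons z rest ih => obtain ⟨x, pv⟩ := z; simp [pvRuns, ih]

theorem pvRuns_snd_getD (zs : List (Int × Int)) (run : Int) (c : Nat) (hc : c < zs.length) :
    (pvRuns zs run).2.getD c 0 =
      if (zs.getD c (0, 0)).1 = 128 then (zs.getD c (0, 0)).2 + 1 else 0 := by
  induction zs generalizing run c with
  | nil => simp at hc
  | cons z rest ih =>
    obtain ⟨x, pv⟩ := z
    cases c with
    | zero => simp [pvRuns]
    | succ c' => simpa [pvRuns] using ih _ c' (by simpa using hc)

theorem zip_getD (xs ys : List Int) (j : Nat) (h1 : j < xs.length) (h2 : j < ys.length) :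
    (xs.zip ys).getD j (0,0) = (xs.getD j 0, ys.getD j 0) := by
  have hz : j < (xs.zip ys).length := by simp [List.length_zip]; omega
  rw [List.getD_eq_getElem _ _ hz, List.getD_eq_getElem _ _ h1, List.getD_eq_getElem _ _ h2]
  exact List.getElem_zip

theorem pvTables_h_ge (m : List (List Int)) (pv : List Int)
    (hrows : ∀ row ∈ m, pv.length ≤ row.length)
    (r : Nat) (hr : r < m.length) (j k : Nat) (hj : j < pv.length) :
    ((k : Int) ≤ ((pvTables m pv).1.getD r []).getD j 0) ↔
      ((∀ d : Nat, d < k → d ≤ j → (m.getD r []).getD (j - d) 0 = 128) ∧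
       ((j : Int) + 1 < (k : Int) → (k : Int) - ((j : Int) + 1) ≤ 0)) := by
  induction m generalizing pv r with
  | nil => simp at hr
  | cons row rest ih =>
    have hrow : pv.length ≤ row.length := hrows row (by simp)
    have hzlen : (row.zip pv).length = pv.length := by simp [List.length_zip]; omega
    have hvlen : (pvRuns (row.zip pv) 0).2.length = pv.length := by
      rw [pvRuns_snd_length]; exact hzlen
    cases r with
    | zero =>
      have hget : ∀ d : Nat, ((row.zip pv).getD (j - d) (0,0)).1 = row.getD (j - d) 0 := by
        intro d
        rw [zip_getD row pv (j - d) (by omega) (by omega)]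
      simp only [pvTables, List.getD_cons_zero]
      rw [pvRuns_fst_ge (row.zip pv) 0 le_rfl j k (by omega)]
      simp only [hget]
    | succ r' =>
      simp only [pvTables, List.getD_cons_succ]
      exact ih (pvRuns (row.zip pv) 0).2
        (by intro row' hm; rw [hvlen]; exact hrows row' (by simp [hm]))
        r' (by simpa using hr) (by omega)

theorem pvTables_v_ge (m : List (List Int)) (pv : List Int)
    (hpv0 : ∀ y ∈ pv, 0 ≤ y)
    (hrows : ∀ row ∈ m, pv.length ≤ row.length)
    (r : Nat) (hr : r < m.length) (c : Nat) (hc : c < pv.length) (k : Nat) :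
    ((k : Int) ≤ ((pvTables m pv).2.getD r []).getD c 0) ↔
      ((∀ d : Nat, d < k → d ≤ r → (m.getD (r - d) []).getD c 0 = 128) ∧
       ((r : Int) + 1 < (k : Int) → (k : Int) - ((r : Int) + 1) ≤ pv.getD c 0)) := by
  induction m generalizing pv r with
  | nil => simp at hr
  | cons row rest ih =>
    have hrow : pv.length ≤ row.length := hrows row (by simp)
    have hzlen : (row.zip pv).length = pv.length := by simp [List.length_zip]; omega
    have hvlen : (pvRuns (row.zip pv) 0).2.length = pv.length := by
      rw [pvRuns_snd_length]; exact hzlen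
    have hv : ∀ c' : Nat, c' < pv.length →
        (pvRuns (row.zip pv) 0).2.getD c' 0 =
          if row.getD c' 0 = 128 then pv.getD c' 0 + 1 else 0 := by
      intro c' hc'
      rw [pvRuns_snd_getD (row.zip pv) 0 c' (by omega), zip_getD row pv c' (by omega) (by omega)]
    have hpvc : 0 ≤ pv.getD c 0 := by
      rw [List.getD_eq_getElem _ _ hc]
      exact hpv0 _ (List.getElem_mem hc)
    have hv0 : ∀ y ∈ (pvRuns (row.zip pv) 0).2, 0 ≤ y := by
      intro y hy
      obtain ⟨i, hi, rfl⟩ := List.mem_iff_getElem.mp hy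
      have hi' : i < pv.length := by omega
      have : (pvRuns (row.zip pv) 0).2[i] = (pvRuns (row.zip pv) 0).2.getD i 0 :=
        (List.getD_eq_getElem _ _ hi).symm
      rw [this, hv i hi']
      have : 0 ≤ pv.getD i 0 := by
        rw [List.getD_eq_getElem _ _ hi']
        exact hpv0 _ (List.getElem_mem hi')
      split_ifs <;> omega
    by_cases hx : row.getD c 0 = 128
    · cases r with
      | zero =>
        simp only [pvTables, List.getD_cons_zero]
        rw [hv c hc]
        rw [if_pos hx]
        constructor
        · intro h
          refine ⟨?_, by omega⟩
          intro d hd hd0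
          interval_cases d
          simpa using hx
        · intro ⟨h1, h2⟩
          by_cases hk1 : (1:Int) < (k:Int)
          · have := h2 (by push_cast; omega); omega
          · omega
      | succ r' =>
        simp only [pvTables, List.getD_cons_succ]
        rw [ih (pvRuns (row.zip pv) 0).2 hv0
            (by intro row' hm; rw [hvlen]; exact hrows row' (by simp [hm]))
            r' (by simpa using hr) (by omega)]
        rw [hv c hc, if_pos hx]
        constructor
        · rintro ⟨h1, h2⟩
          constructor
          · intro d hd hd0
            rcases Nat.lt_or_ge d (r' + 1) with hlt | hge
            · have : (r' + 1 - d) = (r' - d) + 1 := by omega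
              rw [this, List.getD_cons_succ]
              exact h1 d hd (by omega)
            · have : d = r' + 1 := by omega
              subst this
              simpa using hx
          · intro hk; have := h2 (by push_cast at *; omega); push_cast at *; omega
        · rintro ⟨h1, h2⟩
          constructor
          · intro d hd hd0
            have hidx := h1 d hd (by omega)
            have : (r' + 1 - d) = (r' - d) + 1 := by omega
            rw [this, List.getD_cons_succ] at hidx
            exact hidx
          · intro hk
            by_cases hk2 : ((r':Int) + 1) + 1 < (k:Int)
            · have := h2 (by push_cast at *; omega); push_cast at *; omega
            · push_cast at *; omega
    · cases r with
      | zero =>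
        simp only [pvTables, List.getD_cons_zero]
        rw [hv c hc, if_neg hx]
        constructor
        · intro h
          have hk0 : k = 0 := by omega
          subst hk0
          exact ⟨by omega, by omega⟩
        · rintro ⟨h1, h2⟩
          by_cases hk0 : k = 0
          · subst hk0; omega
          · exact absurd (by simpa using h1 0 (by omega) (by omega)) hx
      | succ r' =>
        simp only [pvTables, List.getD_cons_succ]
        rw [ih (pvRuns (row.zip pv) 0).2 hv0
            (by intro row' hm; rw [hvlen]; exact hrows row' (by simp [hm]))
            r' (by simpa using hr) (by omega)]
        rw [hv c hc, if_neg hx]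
        constructor
        · rintro ⟨h1, h2⟩
          have hk : (k:Int) ≤ (r':Int) + 1 := by
            by_contra hcon; have := h2 (by omega); omega
          constructor
          · intro d hd hd0
            have hdle : d ≤ r' := by omega
            have : (r' + 1 - d) = (r' - d) + 1 := by omega
            rw [this, List.getD_cons_succ]
            exact h1 d hd hdle
          · intro hkk; push_cast at *; omega
        · rintro ⟨h1, h2⟩
          by_cases hk : (k:Int) ≤ (r':Int) + 1
          · constructor
            · intro d hd hd0
              have hidx := h1 d hd (by omega)
              have : (r' + 1 - d) = (r' - d) + 1 := by omega
              rw [this, List.getD_cons_succ] at hidx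
              exact hidx
            · intro hkk; omega
          · exact absurd (by simpa using h1 (r' + 1) (by omega) (by omega)) hx

theorem pvGetD_nonneg {α : Type} (xs : List α) (i : Int) (d : α) (h : 0 ≤ i) :
    PySem.List.pyGetD xs i d = xs.getD i.toNat d := by
  simp [PySem.List.pyGetD, PySem.List.pyGet?_of_nonneg xs h, List.getD]

theorem pvPx_nat (m : List (List Int)) (a b : Nat) :
    pvPx m (a : Int) (b : Int) = (m.getD a []).getD b 0 := by
  unfold pvPx
  rw [pvGetD_nonneg _ _ _ (by omega), pvGetD_nonneg _ _ _ (by omega)]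
  simp

theorem pvPx_cast (m : List (List Int)) (a b : Int) (an bn : Nat)
    (ha : a = (an : Int)) (hb : b = (bn : Int)) :
    pvPx m a b = (m.getD an []).getD bn 0 := by
  subst ha hb; exact pvPx_nat m an bn

abbrev pvArms (m : List (List Int)) (rowMax colMax row col : Int) : Prop :=
  (col + 1 ≤ colMax ∧ 0 ≤ col - 1 ∧ row + 1 ≤ rowMax ∧ 0 ≤ row - 1) ∧
  (pvPx m row (col + 1) = 128 ∧ pvPx m row (col - 1) = 128 ∧
   pvPx m (row + 1) col = 128 ∧ pvPx m (row - 1) col = 128) ∧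
  (col + 2 ≤ colMax ∧ 0 ≤ col - 2 ∧ row + 2 ≤ rowMax ∧ 0 ≤ row - 2) ∧
  (pvPx m row (col + 2) = 128 ∧ pvPx m row (col - 2) = 128 ∧
   pvPx m (row + 2) col = 128 ∧ pvPx m (row - 2) col = 128)

abbrev pvPlus (m : List (List Int)) (row col : Int) : Prop :=
  pvPx m row col = 128 ∧
  pvArms m ((m.length : Int) - 1) (((PySem.List.pyGetD m 0 []).length : Int) - 1) row col

theorem pvAInner_eq (m : List (List Int)) (rowMax colMax row col cnt : Int) :
    pvAInner m rowMax colMax row col (PySem.List.pyRange 1 3) cnt =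
      cnt + (if pvArms m rowMax colMax row col then 1 else 0) := by
  have h : PySem.List.pyRange 1 3 = [1, 2] := by decide
  rw [h]
  simp only [pvAInner, pvArms]
  norm_num
  split_ifs <;> omega

theorem A_eq_sum (m : List (List Int)) :
    find_gPlus_in_imageMatrix m =
      ((PySem.List.pyRange 0 (m.length : Int)).map (fun row =>
        ((PySem.List.pyRange 0 (((PySem.List.pyGetD m 0 []).length : Int))).map (fun col =>
          if pvPlus m row col then (1 : Int) else 0)).sum)).sum := by
  unfold find_gPlus_in_imageMatrix
  have hinner : ∀ row cnt0 : Int,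
      (PySem.List.pyRange 0 ((PySem.List.pyGetD m 0 []).length : Int)).foldl (fun cnt col =>
        if pvPx m row col = 128 then
          pvAInner m ((m.length : Int) - 1) (((PySem.List.pyGetD m 0 []).length : Int) - 1) row col
            (PySem.List.pyRange 1 3 1) cnt
        else cnt) cnt0 =
      cnt0 + ((PySem.List.pyRange 0 ((PySem.List.pyGetD m 0 []).length : Int)).map (fun col =>
          if pvPlus m row col then (1 : Int) else 0)).sum := by
    intro row cnt0
    rw [PySem.List.foldl_congr_mem _ _
        (fun cnt col => cnt + (if pvPlus m row col then (1 : Int) else 0)) cnt0 ?_]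
    · exact PySem.List.foldl_add _ _ _
    · intro acc col _
      show (if pvPx m row col = 128 then
          pvAInner m ((m.length : Int) - 1) (((PySem.List.pyGetD m 0 []).length : Int) - 1) row col
            (PySem.List.pyRange 1 3 1) acc
        else acc) = acc + (if pvPlus m row col then (1 : Int) else 0)
      by_cases hc : pvPx m row col = 128
      · rw [if_pos hc, pvAInner_eq]
        congr 1
        by_cases ha : pvArms m ((m.length : Int) - 1) (((PySem.List.pyGetD m 0 []).length : Int) - 1) row col
        · rw [if_pos ha, if_pos (show pvPlus m row col from ⟨hc, ha⟩)]
        · rw [if_neg ha, if_neg (show ¬ pvPlus m row col from fun h => ha h.2)]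
      · rw [if_neg hc, if_neg (show ¬ pvPlus m row col from fun h => hc h.1), add_zero]
  rw [PySem.List.foldl_congr_mem _ _
      (fun cnt row => cnt + ((PySem.List.pyRange 0 ((PySem.List.pyGetD m 0 []).length : Int)).map (fun col =>
          if pvPlus m row col then (1 : Int) else 0)).sum) 0 ?_]
  · rw [PySem.List.foldl_add]; ring_nf
  · intro acc row _
    exact hinner row acc

theorem sum_pyRange_zero (lo hi : Int) (g : Int → Int)
    (h0 : ∀ x, lo ≤ x → x < hi → g x = 0) :
    ((PySem.List.pyRange lo hi).map g).sum = 0 := by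
  apply List.sum_eq_zero
  intro y hy
  obtain ⟨x, hx, rfl⟩ := List.mem_map.mp hy
  obtain ⟨h1, h2⟩ := PySem.List.mem_pyRange_one.mp hx
  exact h0 x h1 h2

theorem sum_pyRange_shrink (lo hi lo' hi' : Int) (g : Int → Int)
    (h1 : lo ≤ lo') (h2 : hi' ≤ hi)
    (h0 : ∀ x, lo ≤ x → x < hi → ¬(lo' ≤ x ∧ x < hi') → g x = 0) :
    ((PySem.List.pyRange lo hi).map g).sum = ((PySem.List.pyRange lo' hi').map g).sum := by
  by_cases hle : lo' < hi'
  · rw [PySem.List.pyRange_one_append lo lo' hi h1 (by omega),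
        PySem.List.pyRange_one_append lo' hi' hi (by omega) h2]
    simp only [List.map_append, List.sum_append]
    rw [sum_pyRange_zero lo lo' g (fun x hx1 hx2 => h0 x hx1 (by omega) (by omega)),
        sum_pyRange_zero hi' hi g (fun x hx1 hx2 => h0 x (by omega) hx2 (by omega))]
    ring
  · rw [show PySem.List.pyRange lo' hi' = [] from PySem.List.pyRange_one_eq_nil (by omega)]
    simpa using sum_pyRange_zero lo hi g (fun x hx1 hx2 => h0 x hx1 hx2 (by omega))

theorem plus_outside (m : List (List Int)) (r c : Int)
    (h : ¬(2 ≤ c ∧ c < ((PySem.List.pyGetD m 0 []).length : Int) - 2) ∨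
         ¬(2 ≤ r ∧ r < (m.length : Int) - 2)) :
    ¬ pvPlus m r c := by
  rintro ⟨-, -, -, ⟨hb1, hb2, hb3, hb4⟩, -⟩
  omega

theorem interior_iff (m : List (List Int))
    (hrows : ∀ row ∈ m, (PySem.List.pyGetD m 0 []).length ≤ row.length)
    (r c : Int)
    (hr : 2 ≤ r ∧ r < (m.length : Int) - 2)
    (hc : 2 ≤ c ∧ c < ((PySem.List.pyGetD m 0 []).length : Int) - 2) :
    ((5 ≤ PySem.List.pyGetD (PySem.List.pyGetD
            (pvTables m (List.replicate (PySem.List.pyGetD m 0 []).length 0)).1 r []) (c + 2) 0 ∧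
      5 ≤ PySem.List.pyGetD (PySem.List.pyGetD
            (pvTables m (List.replicate (PySem.List.pyGetD m 0 []).length 0)).2 (r + 2) []) c 0)
      ↔ pvPlus m r c) := by
  set cols := (PySem.List.pyGetD m 0 []).length with hcols
  set pv0 := (List.replicate cols (0 : Int)) with hpv0
  have hpvlen : pv0.length = cols := by simp [hpv0]
  set rn := r.toNat with hrn
  set cn := c.toNat with hcn
  have hrI : r = (rn : Int) := by omega
  have hcI : c = (cn : Int) := by omega
  have hrn5 : 2 ≤ rn ∧ (rn : Int) < (m.length : Int) - 2 := by omega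
  have hcn5 : 2 ≤ cn ∧ (cn : Int) < (cols : Int) - 2 := by omega
  have hrnm : rn < m.length := by omega
  have hcnm : cn + 2 < cols := by omega
  -- horizontal table entry
  have eH : PySem.List.pyGetD (PySem.List.pyGetD (pvTables m pv0).1 r []) (c + 2) 0 =
      ((pvTables m pv0).1.getD rn []).getD (cn + 2) 0 := by
    rw [pvGetD_nonneg _ _ _ (by omega), pvGetD_nonneg _ _ _ (by omega),
        show (c + 2).toNat = cn + 2 from by omega]
  have eV : PySem.List.pyGetD (PySem.List.pyGetD (pvTables m pv0).2 (r + 2) []) c 0 =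
      ((pvTables m pv0).2.getD (rn + 2) []).getD cn 0 := by
    rw [pvGetD_nonneg _ _ _ (by omega), pvGetD_nonneg _ _ _ (by omega),
        show (r + 2).toNat = rn + 2 from by omega]
  have hH5 := pvTables_h_ge m pv0 (by rw [hpvlen]; exact hrows) rn hrnm (cn + 2) 5 (by omega)
  have hV5 := pvTables_v_ge m pv0 (by intro y hy; simp [hpv0] at hy; omega)
        (by rw [hpvlen]; exact hrows) (rn + 2) (by omega) cn (by omega) 5
  push_cast at hH5 hV5
  rw [eH, eV, hH5, hV5]
  constructor
  · rintro ⟨⟨hH, -⟩, ⟨hV, -⟩⟩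
    have g0 := hH 0 (by omega) (by omega)
    have g1 := hH 1 (by omega) (by omega)
    have g2 := hH 2 (by omega) (by omega)
    have g3 := hH 3 (by omega) (by omega)
    have g4 := hH 4 (by omega) (by omega)
    have v0 := hV 0 (by omega) (by omega)
    have v1 := hV 1 (by omega) (by omega)
    have v3 := hV 3 (by omega) (by omega)
    have v4 := hV 4 (by omega) (by omega)
    refine ⟨?_, ⟨by omega, by omega, by omega, by omega⟩, ⟨?_, ?_, ?_, ?_⟩,
            ⟨by omega, by omega, by omega, by omega⟩, ⟨?_, ?_, ?_, ?_⟩⟩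
    · rw [pvPx_cast m r c rn cn hrI hcI]
      simpa using g2
    · rw [pvPx_cast m r (c + 1) rn (cn + 1) hrI (by omega)]
      simpa using g1
    · rw [pvPx_cast m r (c - 1) rn (cn - 1) hrI (by omega)]
      simpa using g3
    · rw [pvPx_cast m (r + 1) c (rn + 1) cn (by omega) hcI]
      simpa using v1
    · rw [pvPx_cast m (r - 1) c (rn - 1) cn (by omega) hcI]
      simpa using v3
    · rw [pvPx_cast m r (c + 2) rn (cn + 2) hrI (by omega)]
      simpa using g0
    · rw [pvPx_cast m r (c - 2) rn (cn - 2) hrI (by omega)]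
      simpa using g4
    · rw [pvPx_cast m (r + 2) c (rn + 2) cn (by omega) hcI]
      simpa using v0
    · rw [pvPx_cast m (r - 2) c (rn - 2) cn (by omega) hcI]
      simpa using v4
  · rintro ⟨h0, -, ⟨a1, a2, a3, a4⟩, -, ⟨b1, b2, b3, b4⟩⟩
    rw [pvPx_cast m r c rn cn hrI hcI] at h0
    rw [pvPx_cast m r (c + 1) rn (cn + 1) hrI (by omega)] at a1
    rw [pvPx_cast m r (c - 1) rn (cn - 1) hrI (by omega)] at a2
    rw [pvPx_cast m (r + 1) c (rn + 1) cn (by omega) hcI] at a3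
    rw [pvPx_cast m (r - 1) c (rn - 1) cn (by omega) hcI] at a4
    rw [pvPx_cast m r (c + 2) rn (cn + 2) hrI (by omega)] at b1
    rw [pvPx_cast m r (c - 2) rn (cn - 2) hrI (by omega)] at b2
    rw [pvPx_cast m (r + 2) c (rn + 2) cn (by omega) hcI] at b3
    rw [pvPx_cast m (r - 2) c (rn - 2) cn (by omega) hcI] at b4
    refine ⟨⟨?_, by omega⟩, ⟨?_, by omega⟩⟩
    · intro d hd _
      interval_cases d
      · simpa using b1
      · simpa using a1
      · simpa using h0
      · simpa using a2
      · simpa using b2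
    · intro d hd _
      interval_cases d
      · simpa using b3
      · simpa using a3
      · simpa using h0
      · simpa using a4
      · simpa using b4

theorem B_eq_sum (m : List (List Int)) :
    find_gPlus_in_imageMatrix_alt m =
      ((PySem.List.pyRange 2 ((m.length : Int) - 2)).map (fun r =>
        ((PySem.List.pyRange 2 (((PySem.List.pyGetD m 0 []).length : Int) - 2)).map (fun c =>
          if (5 ≤ PySem.List.pyGetD (PySem.List.pyGetD
                (pvTables m (List.replicate (PySem.List.pyGetD m 0 []).length 0)).1 r []) (c + 2) 0 ∧
              5 ≤ PySem.List.pyGetD (PySem.List.pyGetD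
                (pvTables m (List.replicate (PySem.List.pyGetD m 0 []).length 0)).2 (r + 2) []) c 0)
          then (1 : Int) else 0)).sum)).sum := by
  unfold find_gPlus_in_imageMatrix_alt
  rw [PySem.List.foldl_congr_mem _ _
      (fun cnt r => cnt + ((PySem.List.pyRange 2 (((PySem.List.pyGetD m 0 []).length : Int) - 2)).map (fun c =>
          if (5 ≤ PySem.List.pyGetD (PySem.List.pyGetD
                (pvTables m (List.replicate (PySem.List.pyGetD m 0 []).length 0)).1 r []) (c + 2) 0 ∧
              5 ≤ PySem.List.pyGetD (PySem.List.pyGetD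
                (pvTables m (List.replicate (PySem.List.pyGetD m 0 []).length 0)).2 (r + 2) []) c 0)
          then (1 : Int) else 0)).sum) 0 ?_]
  · rw [PySem.List.foldl_add]; ring_nf
  · intro acc r _
    show (PySem.List.pyRange 2 (((PySem.List.pyGetD m 0 []).length : Int) - 2)).foldl (fun cnt c =>
        if (5 ≤ PySem.List.pyGetD (PySem.List.pyGetD
              (pvTables m (List.replicate (PySem.List.pyGetD m 0 []).length 0)).1 r []) (c + 2) 0 ∧
            5 ≤ PySem.List.pyGetD (PySem.List.pyGetD
              (pvTables m (List.replicate (PySem.List.pyGetD m 0 []).length 0)).2 (r + 2) []) c 0)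
        then cnt + 1 else cnt) acc = _
    rw [PySem.List.foldl_congr_mem _ _
        (fun cnt c => cnt + (if (5 ≤ PySem.List.pyGetD (PySem.List.pyGetD
              (pvTables m (List.replicate (PySem.List.pyGetD m 0 []).length 0)).1 r []) (c + 2) 0 ∧
            5 ≤ PySem.List.pyGetD (PySem.List.pyGetD
              (pvTables m (List.replicate (PySem.List.pyGetD m 0 []).length 0)).2 (r + 2) []) c 0)
          then (1 : Int) else 0)) acc ?_]
    · exact PySem.List.foldl_add _ _ _
    · intro acc2 c _
      by_cases hp : (5 ≤ PySem.List.pyGetD (PySem.List.pyGetD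
              (pvTables m (List.replicate (PySem.List.pyGetD m 0 []).length 0)).1 r []) (c + 2) 0 ∧
            5 ≤ PySem.List.pyGetD (PySem.List.pyGetD
              (pvTables m (List.replicate (PySem.List.pyGetD m 0 []).length 0)).2 (r + 2) []) c 0)
      · simp only [if_pos hp]
      · simp only [if_neg hp, add_zero]

-- ===== VERDICT (by name: the statement is the Claim_ definition above) =====
theorem find_gPlus_in_imageMatrix_spec : Claim_equal_find_gPlus_in_imageMatrix := by
  intro m _ hPre
  obtain ⟨hne, hrowsH⟩ := hPre
  have hhead : PySem.List.pyGetD m 0 [] = m.headD [] := by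
    rw [pvGetD_nonneg _ _ _ (by omega)]
    cases m <;> simp
  have hrows : ∀ row ∈ m, (PySem.List.pyGetD m 0 []).length ≤ row.length := by
    intro row hm
    rw [hhead]
    exact hrowsH row hm
  show find_gPlus_in_imageMatrix m = find_gPlus_in_imageMatrix_alt m
  rw [A_eq_sum, B_eq_sum]
  rw [List.map_congr_left (fun row _ =>
    sum_pyRange_shrink 0 ((PySem.List.pyGetD m 0 []).length : Int) 2
      (((PySem.List.pyGetD m 0 []).length : Int) - 2)
      (fun col => if pvPlus m row col then (1 : Int) else 0)
      (by omega) (by omega)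
      (fun x _ _ hx3 => if_neg (plus_outside m row x (Or.inl hx3))))]
  rw [sum_pyRange_shrink 0 (m.length : Int) 2 ((m.length : Int) - 2) _
      (by omega) (by omega)
      (fun row _ _ hx3 => sum_pyRange_zero _ _ _
        (fun c _ _ => if_neg (plus_outside m row c (Or.inr hx3))))]
  refine congrArg List.sum (List.map_congr_left ?_)
  intro r hrmem
  refine congrArg List.sum (List.map_congr_left ?_)
  intro c hcmem
  exact if_congr ((interior_iff m hrows r c
    (PySem.List.mem_pyRange_one.mp hrmem) (PySem.List.mem_pyRange_one.mp hcmem)).symm) rfl rfl
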